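-- pv_equiv track=rewrite | github.com/AKSINGH-0704/DSA | 3934-coupon-code-validator/coupon-code-validator.py | validateCoupons
-- ===== SOURCE A (Python) =====
-- def validateCoupons(code, businessLine, isActive):
--     valid_coupons = []
--     priority = {"electronics": 0, "grocery": 1, "pharmacy": 2, "restaurant": 3}
--
--     for i in range(len(code)):
--         c = code[i]
--         b = businessLine[i]
--         a = isActive[i]
--
--         if not a:
--             continue
--
--         if b not in priority:
--             continue
--
--         if len(c) == 0:
--             continue
--
--         valid_char = True
--         for char in c:
--             if not char.isalnum() and char != '_':
--                 valid_char = False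
--                 break
--
--         if valid_char:
--             valid_coupons.append([priority[b], c])
--
--     valid_coupons.sort()
--
--     result = []
--     for item in valid_coupons:
--         result.append(item[1])
--
--     return result
-- ===== SOURCE B (Python) =====
-- def validateCoupons(code, businessLine, isActive):
--     priority = {"electronics": 0, "grocery": 1, "pharmacy": 2, "restaurant": 3}
--     buckets = [[], [], [], []]
--     for i in range(len(code)):
--         c = code[i]
--         b = businessLine[i]
--         a = isActive[i]
--         if a and b in priority and c and all(ch.isalnum() or ch == '_' for ch in c):
--             buckets[priority[b]].append(c)
--     result = []
--     for bucket in buckets: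
--         result.extend(sorted(bucket))
--     return result
-- ===== Notes on version B (the rewrite author's own statement) =====
-- stated objective: alternative
-- what changed: Replaces append-pairs-then-composite-sort by four priority buckets filled in one pass, each bucket of codes sorted lexicographically and concatenated in priority order 0..3; the per-char validation loop becomes an all() expression.
import Mathlib
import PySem

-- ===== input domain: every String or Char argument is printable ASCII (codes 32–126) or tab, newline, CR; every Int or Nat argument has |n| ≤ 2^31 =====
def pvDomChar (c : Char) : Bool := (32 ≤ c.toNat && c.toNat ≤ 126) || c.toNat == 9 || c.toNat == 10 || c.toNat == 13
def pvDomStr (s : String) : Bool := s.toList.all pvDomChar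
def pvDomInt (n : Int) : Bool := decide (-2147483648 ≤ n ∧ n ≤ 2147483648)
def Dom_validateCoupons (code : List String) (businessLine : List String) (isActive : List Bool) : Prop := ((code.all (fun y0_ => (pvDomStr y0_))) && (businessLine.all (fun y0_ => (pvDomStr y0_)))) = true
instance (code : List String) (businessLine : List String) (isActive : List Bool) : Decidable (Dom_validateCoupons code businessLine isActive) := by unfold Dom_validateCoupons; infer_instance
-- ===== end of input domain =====

-- B replaces A's append-pairs-then-composite-sort by four priority buckets filled in one pass,
-- each bucket sorted lexicographically and concatenated in priority order (objective: alternative).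

-- ===== PORT A =====
-- priority = {"electronics": 0, "grocery": 1, "pharmacy": 2, "restaurant": 3}
def pvPriorityA : PySem.Dict String Int :=
  ((((PySem.Dict.empty).insert "electronics" 0).insert "grocery" 1).insert "pharmacy" 2).insert "restaurant" 3

-- the inner "for char in c" loop with its break
def pvValidCharA : List Char → Bool
  | [] => true
  | ch :: rest => if !(PySem.Chars.isalnum ch) && !(ch == '_') then false else pvValidCharA rest

def validateCoupons (code : List String) (businessLine : List String) (isActive : List Bool) : List String :=
  let valid : List (Int × String) :=
    (PySem.List.pyRange 0 (PySem.List.len code)).foldl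
      (fun acc i =>
        let c := PySem.List.pyGetD code i ""          -- code[i]; Pre_ keeps i in range
        let b := PySem.List.pyGetD businessLine i ""  -- businessLine[i]
        let a := PySem.List.pyGetD isActive i false   -- isActive[i]
        if !a then acc
        else if !(pvPriorityA.contains b) then acc
        else if PySem.Str.len c == 0 then acc
        else if pvValidCharA c.toList then acc ++ [(pvPriorityA.getD b 0, c)] else acc)
      []
  -- valid_coupons.sort(): Python sorts the [priority, code] pairs lexicographically
  let sortedPairs := PySem.List.sorted2 valid (fun x => x.1) (fun x => x.2)
  sortedPairs.foldl (fun r item => r ++ [item.2]) []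

-- ===== PORT B =====
def pvPriorityB : PySem.Dict String Int :=
  ((((PySem.Dict.empty).insert "electronics" 0).insert "grocery" 1).insert "pharmacy" 2).insert "restaurant" 3

def validateCoupons_alt (code : List String) (businessLine : List String) (isActive : List Bool) : List String :=
  let buckets : List (List String) :=
    (PySem.List.pyRange 0 (PySem.List.len code)).foldl
      (fun bk i =>
        let c := PySem.List.pyGetD code i ""
        let b := PySem.List.pyGetD businessLine i ""
        let a := PySem.List.pyGetD isActive i false
        if a && pvPriorityB.contains b && !c.toList.isEmpty
            && c.toList.all (fun ch => PySem.Chars.isalnum ch || ch == '_') then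
          -- buckets[priority[b]].append(c); the index is one of 0..3, so plain Nat indexing is exact
          let p := (pvPriorityB.getD b 0).toNat
          bk.set p (bk.getD p [] ++ [c])
        else bk)
      [[], [], [], []]
  buckets.foldl (fun r bucket => r ++ PySem.List.sorted bucket (fun x => x)) []

-- ===== PRECONDITION & SPEC =====
-- Pre_ excludes exactly the inputs where businessLine[i] or isActive[i] raises IndexError in A (and in B).
def Pre_validateCoupons (code : List String) (businessLine : List String) (isActive : List Bool) : Prop :=
  code.length ≤ businessLine.length ∧ code.length ≤ isActive.length
instance (code : List String) (businessLine : List String) (isActive : List Bool) : Decidable (Pre_validateCoupons code businessLine isActive) := by unfold Pre_validateCoupons; infer_instance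

def pvWitness_validateCoupons : List String × List String × List Bool :=
  (["b_2", "a1", "zz", "no!"], ["grocery", "electronics", "grocery", "pharmacy"], [true, true, true, true])

def Spec_validateCoupons (code : List String) (businessLine : List String) (isActive : List Bool) (out : List String) : Prop := out = validateCoupons_alt code businessLine isActive
instance (code : List String) (businessLine : List String) (isActive : List Bool) (out : List String) : Decidable (Spec_validateCoupons code businessLine isActive out) := by unfold Spec_validateCoupons; infer_instance

-- ===== CLAIM (what is proved, stated in full; the proofs are below) =====
def Claim_equal_validateCoupons : Prop := ∀ (code : List String) (businessLine : List String) (isActive : List Bool), Dom_validateCoupons code businessLine isActive → Pre_validateCoupons code businessLine isActive → Spec_validateCoupons code businessLine isActive (validateCoupons code businessLine isActive)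

-- ===== LEMMAS AND PROOFS =====

-- shared shapes (proof-side only)
def pvPred (ch : Char) : Bool := PySem.Chars.isalnum ch || ch == '_'
def pvCond (t : String × String × Bool) : Bool :=
  t.2.2 && pvPriorityA.contains t.2.1 && !t.1.toList.isEmpty && t.1.toList.all pvPred
def pvPrio (b : String) : Int := pvPriorityA.getD b 0
def pvPair (t : String × String × Bool) : Int × String := (pvPrio t.2.1, t.1)

-- the valid [priority, code] pairs over the zipped input, and the per-priority buckets
def pvV (Z : List (String × String × Bool)) : List (Int × String) := (Z.filter pvCond).map pvPair
def pvBkt (Z : List (String × String × Bool)) (p : Int) : List String :=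
  ((Z.filter pvCond).filter (fun t => pvPrio t.2.1 == p)).map (fun t => t.1)

-- B's loop step, named so the fold invariant can be stated
def pvStep (bk : List (List String)) (t : String × String × Bool) : List (List String) :=
  if pvCond t then bk.set (pvPrio t.2.1).toNat (bk.getD (pvPrio t.2.1).toNat [] ++ [t.1]) else bk

theorem pvValidCharA_eq_all (cs : List Char) : pvValidCharA cs = cs.all pvPred := by
  induction cs with
  | nil => rfl
  | cons ch rest ih =>
    simp only [pvValidCharA, List.all_cons, pvPred]
    cases h1 : PySem.Chars.isalnum ch <;> cases h2 : ch == '_' <;> simp [ih]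

theorem pvItemsA : pvPriorityA.items = [("electronics", (0:Int)), ("grocery", 1), ("pharmacy", 2), ("restaurant", 3)] := by rfl

theorem pvPrio_cases {b : String} (h : pvPriorityA.contains b = true) :
    pvPrio b = 0 ∨ pvPrio b = 1 ∨ pvPrio b = 2 ∨ pvPrio b = 3 := by
  have hb : b = "electronics" ∨ b = "grocery" ∨ b = "pharmacy" ∨ b = "restaurant" := by
    simp only [PySem.Dict.contains, pvItemsA, List.any_cons, List.any_nil, Bool.or_false,
      Bool.or_eq_true, beq_iff_eq] at h
    tauto
  rcases hb with rfl | rfl | rfl | rfl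
  · exact Or.inl (by decide)
  · exact Or.inr (Or.inl (by decide))
  · exact Or.inr (Or.inr (Or.inl (by decide)))
  · exact Or.inr (Or.inr (Or.inr (by decide)))

theorem pvBodyA_eq (acc : List (Int × String)) (c b : String) (a : Bool) :
    (if !a then acc else if !(pvPriorityA.contains b) then acc else if PySem.Str.len c == 0 then acc
     else if pvValidCharA c.toList then acc ++ [(pvPriorityA.getD b 0, c)] else acc)
    = if pvCond (c, b, a) then acc ++ [pvPair (c, b, a)] else acc := by
  unfold pvCond pvPair pvPrio
  rw [pvValidCharA_eq_all]
  cases a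
  · simp
  · cases h : pvPriorityA.contains b
    · simp [h]
    · cases hc : c.toList
      · simp [hc, PySem.Str.len_eq]
      · simp [hc, PySem.Str.len_eq]
        intro h'; exfalso; omega

-- A's collection loop over indices equals map∘filter over the zipped input
theorem pvA_valid (code businessLine : List String) (isActive : List Bool)
    (h1 : code.length ≤ businessLine.length) (h2 : code.length ≤ isActive.length) :
    (PySem.List.pyRange 0 (PySem.List.len code)).foldl
      (fun acc i =>
        let c := PySem.List.pyGetD code i ""
        let b := PySem.List.pyGetD businessLine i ""
        let a := PySem.List.pyGetD isActive i false
        if !a then acc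
        else if !(pvPriorityA.contains b) then acc
        else if PySem.Str.len c == 0 then acc
        else if pvValidCharA c.toList then acc ++ [(pvPriorityA.getD b 0, c)] else acc)
      [] = pvV (code.zip (businessLine.zip isActive)) := by
  set Z := code.zip (businessLine.zip isActive) with hZ
  have hlen : Z.length = code.length := by
    simp [hZ, List.length_zip]; omega
  have hlen' : PySem.List.len code = PySem.List.len Z := by simp [PySem.List.len, hlen]
  rw [hlen']
  rw [PySem.List.foldl_congr_mem _ _
      (fun acc j => if pvCond (PySem.List.pyGetD Z j ("", "", false)) then
        acc ++ [pvPair (PySem.List.pyGetD Z j ("", "", false))] else acc) _ ?_]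
  · rw [PySem.List.foldl_pyRange_pyGetD Z ("", "", false)
      (fun acc t => if pvCond t then acc ++ [pvPair t] else acc) [] le_rfl]
    simp only [Int.toNat_zero, List.drop_zero]
    rw [PySem.List.foldl_append_if]
    simp [pvV]
  · intro acc i hi
    rw [PySem.List.mem_pyRange_one] at hi
    obtain ⟨hi0, hin⟩ := hi
    have hiN : i.toNat < Z.length := by
      simp [PySem.List.len] at hin; omega
    have hic : i.toNat < code.length := by omega
    have hib : i.toNat < businessLine.length := by omega
    have hia : i.toNat < isActive.length := by omega
    have e1 : PySem.List.pyGetD code i "" = code[i.toNat] :=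
      PySem.List.pyGetD_eq_getElem _ _ hi0 (by simp [PySem.List.len] at hin ⊢ <;> omega)
    have e2 : PySem.List.pyGetD businessLine i "" = businessLine[i.toNat] :=
      PySem.List.pyGetD_eq_getElem _ _ hi0 (by simp [PySem.List.len] at hin ⊢ <;> omega)
    have e3 : PySem.List.pyGetD isActive i false = isActive[i.toNat] :=
      PySem.List.pyGetD_eq_getElem _ _ hi0 (by simp [PySem.List.len] at hin ⊢ <;> omega)
    have e4 : PySem.List.pyGetD Z i ("", "", false) = (code[i.toNat], (businessLine[i.toNat], isActive[i.toNat])) := by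
      rw [PySem.List.pyGetD_eq_getElem _ _ hi0 (by simp [PySem.List.len] at hin ⊢ <;> omega)]
      simp [hZ, List.getElem_zip]
    simp only [e1, e2, e3, e4]
    exact pvBodyA_eq acc _ _ _

-- the bucket fold invariant
theorem pvBuckets_foldl (L : List (String × String × Bool)) : ∀ (u0 u1 u2 u3 : List String),
    L.foldl pvStep [u0, u1, u2, u3]
    = [u0 ++ pvBkt L 0, u1 ++ pvBkt L 1, u2 ++ pvBkt L 2, u3 ++ pvBkt L 3] := by
  induction L with
  | nil => intro u0 u1 u2 u3; simp [pvBkt]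
  | cons t L ih =>
    intro u0 u1 u2 u3
    rw [List.foldl_cons]
    by_cases hc : pvCond t
    · have hcont : pvPriorityA.contains t.2.1 = true := by
        simp only [pvCond, Bool.and_eq_true] at hc; exact hc.1.1.2
      rcases pvPrio_cases hcont with hp | hp | hp | hp
      · rw [show pvStep [u0, u1, u2, u3] t = [u0 ++ [t.1], u1, u2, u3] by
          simp [pvStep, hc, hp, List.getD], ih]
        simp [pvBkt, List.filter_cons, hc, hp]
      · rw [show pvStep [u0, u1, u2, u3] t = [u0, u1 ++ [t.1], u2, u3] by
          simp [pvStep, hc, hp, List.getD], ih]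
        simp [pvBkt, List.filter_cons, hc, hp]
      · rw [show pvStep [u0, u1, u2, u3] t = [u0, u1, u2 ++ [t.1], u3] by
          simp [pvStep, hc, hp, List.getD], ih]
        simp [pvBkt, List.filter_cons, hc, hp]
      · rw [show pvStep [u0, u1, u2, u3] t = [u0, u1, u2, u3 ++ [t.1]] by
          simp [pvStep, hc, hp, List.getD], ih]
        simp [pvBkt, List.filter_cons, hc, hp]
    · rw [show pvStep [u0, u1, u2, u3] t = [u0, u1, u2, u3] by simp [pvStep, hc], ih]
      simp [pvBkt, List.filter_cons, hc]

-- B's bucket loop over indices lands in the four buckets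
theorem pvB_buckets (code businessLine : List String) (isActive : List Bool)
    (h1 : code.length ≤ businessLine.length) (h2 : code.length ≤ isActive.length) :
    (PySem.List.pyRange 0 (PySem.List.len code)).foldl
      (fun bk i =>
        let c := PySem.List.pyGetD code i ""
        let b := PySem.List.pyGetD businessLine i ""
        let a := PySem.List.pyGetD isActive i false
        if a && pvPriorityB.contains b && !c.toList.isEmpty
            && c.toList.all (fun ch => PySem.Chars.isalnum ch || ch == '_') then
          let p := (pvPriorityB.getD b 0).toNat
          bk.set p (bk.getD p [] ++ [c])
        else bk)
      [[], [], [], []] =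
      [pvBkt (code.zip (businessLine.zip isActive)) 0, pvBkt (code.zip (businessLine.zip isActive)) 1,
       pvBkt (code.zip (businessLine.zip isActive)) 2, pvBkt (code.zip (businessLine.zip isActive)) 3] := by
  set Z := code.zip (businessLine.zip isActive) with hZ
  have hlen : Z.length = code.length := by
    simp [hZ, List.length_zip]; omega
  have hlen' : PySem.List.len code = PySem.List.len Z := by simp [PySem.List.len, hlen]
  rw [hlen']
  rw [PySem.List.foldl_congr_mem _ _
      (fun bk j => pvStep bk (PySem.List.pyGetD Z j ("", "", false))) _ ?_]
  · rw [PySem.List.foldl_pyRange_pyGetD Z ("", "", false) pvStep _ le_rfl]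
    simp only [Int.toNat_zero, List.drop_zero]
    rw [pvBuckets_foldl Z [] [] [] []]
    simp
  · intro bk i hi
    rw [PySem.List.mem_pyRange_one] at hi
    obtain ⟨hi0, hin⟩ := hi
    have hiN : i.toNat < Z.length := by
      simp [PySem.List.len] at hin; omega
    have hic : i.toNat < code.length := by omega
    have hib : i.toNat < businessLine.length := by omega
    have hia : i.toNat < isActive.length := by omega
    have e1 : PySem.List.pyGetD code i "" = code[i.toNat] :=
      PySem.List.pyGetD_eq_getElem _ _ hi0 (by simp [PySem.List.len] at hin ⊢ <;> omega)
    have e2 : PySem.List.pyGetD businessLine i "" = businessLine[i.toNat] :=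
      PySem.List.pyGetD_eq_getElem _ _ hi0 (by simp [PySem.List.len] at hin ⊢ <;> omega)
    have e3 : PySem.List.pyGetD isActive i false = isActive[i.toNat] :=
      PySem.List.pyGetD_eq_getElem _ _ hi0 (by simp [PySem.List.len] at hin ⊢ <;> omega)
    have e4 : PySem.List.pyGetD Z i ("", "", false) = (code[i.toNat], (businessLine[i.toNat], isActive[i.toNat])) := by
      rw [PySem.List.pyGetD_eq_getElem _ _ hi0 (by simp [PySem.List.len] at hin ⊢ <;> omega)]
      simp [hZ, List.getElem_zip]
    simp only [e1, e2, e3, e4]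
    rfl

-- Python sorts [priority, code] pairs lexicographically: that is the Lex order on Int × String
theorem pvSorted2_lex (V : List (Int × String)) :
    PySem.List.sorted2 V (fun x => x.1) (fun x => x.2)
      = PySem.List.sorted V (fun x => (toLex x : Lex (Int × String))) := by
  have hbf : (fun (a b : Int × String) => decide (a.1 < b.1) || (!decide (b.1 < a.1) && decide (a.2 < b.2)))
      = (fun a b : Int × String => decide ((toLex a : Lex (Int × String)) < toLex b)) := by
    funext a b
    by_cases h1 : a.1 < b.1
    · simp [h1, Prod.Lex.lt_iff]
    · by_cases h2 : b.1 < a.1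
      · simp [h1, h2, Prod.Lex.lt_iff]
        omega
      · have he : a.1 = b.1 := le_antisymm (not_lt.1 h2) (not_lt.1 h1)
        simp [h1, h2, Prod.Lex.lt_iff, he]
  rw [PySem.List.sorted_eq_foldl_insertBy,
    show PySem.List.sorted2 V (fun x => x.1) (fun x => x.2)
      = List.foldl (fun acc x => PySem.List.insertBy
          (fun a b => decide (a.1 < b.1) || (!decide (b.1 < a.1) && decide (a.2 < b.2))) x acc) [] V from rfl,
    hbf]

theorem pvMapMkSnd (p : Int) (l : List (Int × String)) (h : ∀ x ∈ l, x.1 = p) :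
    (l.map (fun x => x.2)).map (fun s => (p, s)) = l := by
  induction l with
  | nil => rfl
  | cons x l ih =>
    have hx := h x (by simp)
    simp only [List.map_cons, List.cons.injEq]
    exact ⟨by rw [← hx], ih (fun y hy => h y (by simp [hy]))⟩

theorem pvPermFour (V : List (Int × String)) (hV : ∀ x ∈ V, x.1 = 0 ∨ x.1 = 1 ∨ x.1 = 2 ∨ x.1 = 3) :
    V.Perm (V.filter (fun x => x.1 == 0) ++ (V.filter (fun x => x.1 == 1) ++
      (V.filter (fun x => x.1 == 2) ++ V.filter (fun x => x.1 == 3)))) := by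
  induction V with
  | nil => rfl
  | cons x V ih =>
    have ih' := ih (fun y hy => hV y (by simp [hy]))
    rcases hV x (by simp) with hx | hx | hx | hx
    · simp only [List.filter_cons, hx]
      simpa using ih'.cons x
    · simp only [List.filter_cons, hx]
      refine ((ih'.cons x).trans ?_)
      simp only [show (((1:Int)) == 0) = false from rfl, show (((1:Int)) == 1) = true from rfl, if_true, if_false]
      exact (List.perm_middle (a := x)).symm
    · simp only [List.filter_cons, hx]
      refine (ih'.cons x).trans ?_
      simp only [show (((2:Int)) == 0) = false from rfl, show (((2:Int)) == 1) = false from rfl,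
        show (((2:Int)) == 2) = true from rfl, if_true, if_false]
      have h := (List.perm_middle (l₁ := V.filter (fun x => x.1 == 0) ++ V.filter (fun x => x.1 == 1))
        (l₂ := V.filter (fun x => x.1 == 2) ++ V.filter (fun x => x.1 == 3)) (a := x)).symm
      simpa [List.append_assoc] using h
    · simp only [List.filter_cons, hx]
      refine (ih'.cons x).trans ?_
      simp only [show (((3:Int)) == 0) = false from rfl, show (((3:Int)) == 1) = false from rfl,
        show (((3:Int)) == 2) = false from rfl, show (((3:Int)) == 3) = true from rfl, if_true, if_false]
      have h := (List.perm_middle (l₁ := (V.filter (fun x => x.1 == 0) ++ V.filter (fun x => x.1 == 1))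
          ++ V.filter (fun x => x.1 == 2))
        (l₂ := V.filter (fun x => x.1 == 3)) (a := x)).symm
      simpa [List.append_assoc] using h

-- the core: composite sort of the pairs, projected to codes, equals per-bucket sorts concatenated
theorem pvSortSplit (V : List (Int × String)) (hV : ∀ x ∈ V, x.1 = 0 ∨ x.1 = 1 ∨ x.1 = 2 ∨ x.1 = 3) :
    (PySem.List.sorted2 V (fun x => x.1) (fun x => x.2)).map (fun x => x.2)
    = PySem.List.sorted ((V.filter (fun x => x.1 == 0)).map (fun x => x.2)) (fun x => x)
      ++ (PySem.List.sorted ((V.filter (fun x => x.1 == 1)).map (fun x => x.2)) (fun x => x)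
      ++ (PySem.List.sorted ((V.filter (fun x => x.1 == 2)).map (fun x => x.2)) (fun x => x)
      ++ PySem.List.sorted ((V.filter (fun x => x.1 == 3)).map (fun x => x.2)) (fun x => x))) := by
  have hfilt : ∀ (p : Int), ∀ x ∈ V.filter (fun x => x.1 == p), x.1 = p := by
    intro p x hx
    have := (List.mem_filter.1 hx).2
    simpa using this
  have key_inj : Function.Injective (fun x : Int × String => (toLex x : Lex (Int × String))) :=
    fun a b h => toLex.injective h
  have hW : ∀ (p : Int),
      ((PySem.List.sorted ((V.filter (fun x => x.1 == p)).map (fun x => x.2)) (fun x => x)).map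
        (fun s => (p, s))).Perm (V.filter (fun x => x.1 == p)) := by
    intro p
    have h1 := (PySem.List.sorted_perm ((V.filter (fun x => x.1 == p)).map (fun x => x.2)) (fun x => x) false).map (fun s => ((p : Int), s))
    rw [pvMapMkSnd p _ (hfilt p)] at h1
    exact h1
  have hperm : (PySem.List.sorted V (fun x => (toLex x : Lex (Int × String)))).Perm
      (((PySem.List.sorted ((V.filter (fun x => x.1 == 0)).map (fun x => x.2)) (fun x => x)).map (fun s => ((0:Int), s)))
       ++ (((PySem.List.sorted ((V.filter (fun x => x.1 == 1)).map (fun x => x.2)) (fun x => x)).map (fun s => ((1:Int), s)))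
       ++ (((PySem.List.sorted ((V.filter (fun x => x.1 == 2)).map (fun x => x.2)) (fun x => x)).map (fun s => ((2:Int), s)))
       ++ ((PySem.List.sorted ((V.filter (fun x => x.1 == 3)).map (fun x => x.2)) (fun x => x)).map (fun s => ((3:Int), s)))))) := by
    refine (PySem.List.sorted_perm V _ false).trans ((pvPermFour V hV).trans ?_)
    exact (((hW 0).append (((hW 1)).append ((hW 2).append (hW 3)))).symm)
  have hpair_block : ∀ (p : Int),
      List.Pairwise (fun a b : Int × String => (toLex a : Lex (Int × String)) ≤ toLex b)
        ((PySem.List.sorted ((V.filter (fun x => x.1 == p)).map (fun x => x.2)) (fun x => x)).map (fun s => (p, s))) := by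
    intro p
    rw [List.pairwise_map]
    refine (PySem.List.sorted_pairwise _ _).imp ?_
    intro s1 s2 hs
    rw [Prod.Lex.le_iff]
    exact Or.inr ⟨rfl, hs⟩
  have hmem_block : ∀ (p : Int) a, a ∈ ((PySem.List.sorted ((V.filter (fun x => x.1 == p)).map (fun x => x.2)) (fun x => x)).map (fun s => ((p:Int), s))) → a.1 = p := by
    intro p a ha
    obtain ⟨s, _, rfl⟩ := List.mem_map.1 ha
    rfl
  have hcross : ∀ (p q : Int), p < q → ∀ (a : Int × String), a.1 = p → ∀ (b : Int × String), b.1 = q →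
      (toLex (a : Int × String) : Lex (Int × String)) ≤ toLex b := by
    intro p q hpq a hap b hbq
    rw [Prod.Lex.le_iff]
    left
    show a.1 < b.1
    omega
  have hpairW : List.Pairwise (fun a b : Int × String => (toLex a : Lex (Int × String)) ≤ toLex b)
      (((PySem.List.sorted ((V.filter (fun x => x.1 == 0)).map (fun x => x.2)) (fun x => x)).map (fun s => ((0:Int), s)))
       ++ (((PySem.List.sorted ((V.filter (fun x => x.1 == 1)).map (fun x => x.2)) (fun x => x)).map (fun s => ((1:Int), s)))
       ++ (((PySem.List.sorted ((V.filter (fun x => x.1 == 2)).map (fun x => x.2)) (fun x => x)).map (fun s => ((2:Int), s)))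
       ++ ((PySem.List.sorted ((V.filter (fun x => x.1 == 3)).map (fun x => x.2)) (fun x => x)).map (fun s => ((3:Int), s)))))) := by
    rw [List.pairwise_append]
    refine ⟨hpair_block 0, ?_, ?_⟩
    · rw [List.pairwise_append]
      refine ⟨hpair_block 1, ?_, ?_⟩
      · rw [List.pairwise_append]
        refine ⟨hpair_block 2, hpair_block 3, ?_⟩
        · intro a ha b hb
          exact hcross 2 3 (by norm_num) a (hmem_block 2 a ha) b (hmem_block 3 b hb)
      · intro a ha b hb
        rcases List.mem_append.1 hb with hb | hb
        · exact hcross 1 2 (by norm_num) a (hmem_block 1 a ha) b (hmem_block 2 b hb)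
        · exact hcross 1 3 (by norm_num) a (hmem_block 1 a ha) b (hmem_block 3 b hb)
    · intro a ha b hb
      rcases List.mem_append.1 hb with hb | hb
      · exact hcross 0 1 (by norm_num) a (hmem_block 0 a ha) b (hmem_block 1 b hb)
      · rcases List.mem_append.1 hb with hb | hb
        · exact hcross 0 2 (by norm_num) a (hmem_block 0 a ha) b (hmem_block 2 b hb)
        · exact hcross 0 3 (by norm_num) a (hmem_block 0 a ha) b (hmem_block 3 b hb)
  have hmain := PySem.List.eq_of_perm_of_pairwise_le_of_injective
    (l₁ := PySem.List.sorted V (fun x => (toLex x : Lex (Int × String))))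
    (fun x : Int × String => (toLex x : Lex (Int × String))) key_inj hperm
    (PySem.List.sorted_pairwise _ _) hpairW
  rw [pvSorted2_lex, hmain]
  simp [List.map_map, Function.comp_def]

theorem pvBkt_eq (Z : List (String × String × Bool)) (p : Int) :
    ((pvV Z).filter (fun x => x.1 == p)).map (fun x => x.2) = pvBkt Z p := by
  simp only [pvV, pvBkt, List.filter_map, List.map_map]
  rfl

theorem pvV_fst (Z : List (String × String × Bool)) :
    ∀ x ∈ pvV Z, x.1 = 0 ∨ x.1 = 1 ∨ x.1 = 2 ∨ x.1 = 3 := by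
  intro x hx
  obtain ⟨t, ht, rfl⟩ := List.mem_map.1 hx
  have hc : pvCond t = true := (List.mem_filter.1 ht).2
  have hcont : pvPriorityA.contains t.2.1 = true := by
    simp only [pvCond, Bool.and_eq_true] at hc; exact hc.1.1.2
  exact pvPrio_cases hcont

theorem pvSortSplitZ (Z : List (String × String × Bool)) :
    (PySem.List.sorted2 (pvV Z) (fun x => x.1) (fun x => x.2)).map (fun x => x.2)
    = PySem.List.sorted (pvBkt Z 0) (fun x => x) ++ (PySem.List.sorted (pvBkt Z 1) (fun x => x)
      ++ (PySem.List.sorted (pvBkt Z 2) (fun x => x) ++ PySem.List.sorted (pvBkt Z 3) (fun x => x))) := by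
  rw [pvSortSplit (pvV Z) (pvV_fst Z), pvBkt_eq, pvBkt_eq, pvBkt_eq, pvBkt_eq]

-- ===== VERDICT (by name: the statement is the Claim_ definition above) =====
theorem validateCoupons_spec : Claim_equal_validateCoupons := by
  intro code businessLine isActive _hdom hpre
  obtain ⟨h1, h2⟩ := hpre
  unfold Spec_validateCoupons validateCoupons validateCoupons_alt
  rw [pvA_valid code businessLine isActive h1 h2, pvB_buckets code businessLine isActive h1 h2,
    PySem.List.foldl_append_singleton_eq_map]
  simp only [List.foldl, List.nil_append]
  rw [pvSortSplitZ (code.zip (businessLine.zip isActive))]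
  simp [List.append_assoc]
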